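-- pv_equiv track=rewrite | github.com/tonybnya/fcc-daily-coding-challenge | fcc_037_find_landing_spot.py | find_landing_spot
-- ===== SOURCE A (Python) =====
-- def find_landing_spot(matrix: list[list[int]]) -> list[int]:
--     directions: list[tuple] = [(-1, 0), (1, 0), (0, -1), (0, 1)]
--     min_danger = float('inf')
--     best_spot = None
--
--     for row in range(len(matrix)):
--         for col in range(len(matrix[0])):
--             if matrix[row][col] == 0:
--                 total_danger: int = 0
--
--                 for drow, dcol in directions:
--                     nrow, ncol = row + drow, col + dcol
--                     if 0 <= nrow < len(matrix) and 0 <= ncol < len(matrix[0]):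
--                         total_danger += matrix[nrow][ncol]
--
--                 if total_danger < min_danger:
--                     min_danger = total_danger
--                     best_spot = [row, col]
--
--     return best_spot
-- ===== SOURCE B (Python) =====
-- def find_landing_spot(matrix: list[list[int]]) -> list[int]:
--     rows = len(matrix)
--     if rows == 0:
--         return None
--     cols = len(matrix[0])
--     grid = [row[:cols] for row in matrix]
--     zero_row = [0] * cols
--     from_above = [zero_row] + grid[:-1]
--     from_below = grid[1:] + [zero_row]
--     danger = [
--         [u + d + l + r for (u, d, l, r) in zip(ua, da, [0] + ra[:-1], ra[1:] + [0])]
--         for (ua, da, ra) in zip(from_above, from_below, grid)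
--     ]
--     best = None
--     best_danger = None
--     for r in range(rows):
--         for c in range(cols):
--             if grid[r][c] == 0 and (best_danger is None or danger[r][c] < best_danger):
--                 best_danger = danger[r][c]
--                 best = [r, c]
--     return best
-- ===== Notes on version B (the rewrite author's own statement) =====
-- stated objective: alternative
-- what changed: B replaces A's per-zero-cell gather over a directions table by precomputing a danger grid as the elementwise sum of four zero-padded shifted copies of the matrix, then a single row-major scan over zero cells tracking the strictly-first minimum.
import Mathlib
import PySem

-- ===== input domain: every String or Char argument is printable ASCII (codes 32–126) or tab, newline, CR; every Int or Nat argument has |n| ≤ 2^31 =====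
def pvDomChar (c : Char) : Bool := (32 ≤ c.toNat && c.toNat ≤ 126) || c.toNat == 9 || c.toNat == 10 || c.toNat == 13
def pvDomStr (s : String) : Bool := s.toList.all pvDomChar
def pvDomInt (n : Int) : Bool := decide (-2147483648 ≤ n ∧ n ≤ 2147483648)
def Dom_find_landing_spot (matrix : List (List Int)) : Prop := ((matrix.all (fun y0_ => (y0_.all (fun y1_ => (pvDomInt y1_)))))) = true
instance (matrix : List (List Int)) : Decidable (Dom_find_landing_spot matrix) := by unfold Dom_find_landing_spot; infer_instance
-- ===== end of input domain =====

-- B replaces A's per-cell gather over a directions table by a danger grid built once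
-- from four zero-padded shifted copies of the matrix (alternative decomposition, same cost).

-- ===== PORT A =====
-- 'total_danger < min_danger' where min_danger starts at float('inf'): none models inf exactly
def pyLtInf (t : Int) (m : Option Int) : Bool :=
  match m with
  | none => true
  | some v => t < v

def find_landing_spot (matrix : List (List Int)) : Option (List Int) :=
  let directions : List (Int × Int) := [(-1, 0), (1, 0), (0, -1), (0, 1)]
  let st := (PySem.List.pyRange 0 (matrix.length : Int) 1).foldl (fun st row =>
    (PySem.List.pyRange 0 ((matrix.headD []).length : Int) 1).foldl (fun st col =>
      if PySem.List.pyGetD (PySem.List.pyGetD matrix row []) col 0 == 0 then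
        let total := directions.foldl (fun t d =>
          let nrow := row + d.1
          let ncol := col + d.2
          if 0 ≤ nrow ∧ nrow < (matrix.length : Int) ∧ 0 ≤ ncol ∧ ncol < ((matrix.headD []).length : Int) then
            t + PySem.List.pyGetD (PySem.List.pyGetD matrix nrow []) ncol 0
          else t) (0 : Int)
        if pyLtInf total st.1 then (some total, some [row, col]) else st
      else st) st)
    ((none : Option Int), (none : Option (List Int)))
  st.2

-- ===== PORT B =====
def find_landing_spot_alt (matrix : List (List Int)) : Option (List Int) :=
  if matrix.length == 0 then none else
  let cols := (matrix.headD []).length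
  let grid := matrix.map (fun row => PySem.List.slice row none (some (cols : Int)))
  let zero_row := List.replicate cols (0 : Int)
  let from_above := zero_row :: PySem.List.slice grid none (some (-1))
  let from_below := PySem.List.slice grid (some 1) none ++ [zero_row]
  let danger := (from_above.zip (from_below.zip grid)).map (fun t =>
    (t.1.zip (t.2.1.zip (((0 : Int) :: PySem.List.slice t.2.2 none (some (-1))).zip
        (PySem.List.slice t.2.2 (some 1) none ++ [(0 : Int)])))).map
      (fun q => q.1 + q.2.1 + q.2.2.1 + q.2.2.2))
  let st := (PySem.List.pyRange 0 (matrix.length : Int) 1).foldl (fun st r =>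
    (PySem.List.pyRange 0 (cols : Int) 1).foldl (fun st c =>
      if (PySem.List.pyGetD (PySem.List.pyGetD grid r []) c 0 == 0) &&
         (match st.1 with
          | none => true
          | some m => decide (PySem.List.pyGetD (PySem.List.pyGetD danger r []) c 0 < m)) then
        (some (PySem.List.pyGetD (PySem.List.pyGetD danger r []) c 0), some [r, c])
      else st) st)
    ((none : Option Int), (none : Option (List Int)))
  st.2

-- ===== PRECONDITION & SPEC =====
-- Pre_ excludes exactly the ragged matrices with a row shorter than the first row,
-- on which A raises IndexError.
def Pre_find_landing_spot (matrix : List (List Int)) : Prop :=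
  ∀ row ∈ matrix, (matrix.headD []).length ≤ row.length

instance (matrix : List (List Int)) : Decidable (Pre_find_landing_spot matrix) := by
  unfold Pre_find_landing_spot; infer_instance

def pvWitness_find_landing_spot : List (List Int) := [[1, 0], [2, 0]]

def Spec_find_landing_spot (matrix : List (List Int)) (out : Option (List Int)) : Prop := out = find_landing_spot_alt matrix
instance (matrix : List (List Int)) (out : Option (List Int)) : Decidable (Spec_find_landing_spot matrix out) := by unfold Spec_find_landing_spot; infer_instance

-- ===== CLAIM (what is proved, stated in full; the proofs are below) =====
def Claim_equal_find_landing_spot : Prop := ∀ (matrix : List (List Int)), Dom_find_landing_spot matrix → Pre_find_landing_spot matrix → Spec_find_landing_spot matrix (find_landing_spot matrix)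

-- ===== LEMMAS AND PROOFS =====

-- proof-only helpers: the 2-D entry, B's grid and danger as standalone terms, the neighbour sum
def ent (l : List (List Int)) (i j : Nat) : Int := (l.getD i []).getD j 0

def gridOf (m : List (List Int)) : List (List Int) :=
  m.map (fun row => PySem.List.slice row none (some (((m.headD []).length : Nat) : Int)))

def dangerOf (m : List (List Int)) : List (List Int) :=
  ((List.replicate (m.headD []).length (0 : Int) :: PySem.List.slice (gridOf m) none (some (-1))).zip
    ((PySem.List.slice (gridOf m) (some 1) none ++ [List.replicate (m.headD []).length (0 : Int)]).zip (gridOf m))).map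
    (fun t =>
      (t.1.zip (t.2.1.zip (((0 : Int) :: PySem.List.slice t.2.2 none (some (-1))).zip
          (PySem.List.slice t.2.2 (some 1) none ++ [(0 : Int)])))).map
        (fun q => q.1 + q.2.1 + q.2.2.1 + q.2.2.2))

def nbr (m : List (List Int)) (i j : Nat) : Int :=
  (if 1 ≤ i then ent m (i - 1) j else 0)
  + (if i + 1 < m.length then ent m (i + 1) j else 0)
  + (if 1 ≤ j then ent m i (j - 1) else 0)
  + (if j + 1 < (m.headD []).length then ent m i (j + 1) else 0)

theorem alt_eq_gridOf (m : List (List Int)) :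
    find_landing_spot_alt m =
      (if m.length == 0 then none else
        ((PySem.List.pyRange 0 (m.length : Int) 1).foldl (fun st r =>
          (PySem.List.pyRange 0 (((m.headD []).length : Nat) : Int) 1).foldl (fun st c =>
            if (PySem.List.pyGetD (PySem.List.pyGetD (gridOf m) r []) c 0 == 0) &&
               (match st.1 with
                | none => true
                | some mm => decide (PySem.List.pyGetD (PySem.List.pyGetD (dangerOf m) r []) c 0 < mm)) then
              (some (PySem.List.pyGetD (PySem.List.pyGetD (dangerOf m) r []) c 0), some [r, c])
            else st) st)
          ((none : Option Int), (none : Option (List Int)))).2) := rfl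

theorem length_gridOf (m : List (List Int)) : (gridOf m).length = m.length := by
  simp [gridOf]

theorem gridOf_row (m : List (List Int)) (i : Nat) (hi : i < m.length) :
    (gridOf m).getD i [] = (m.getD i []).take (m.headD []).length := by
  unfold gridOf
  have hi' : i < (List.map (fun row => PySem.List.slice row none (some (((m.headD []).length : Nat) : Int))) m).length := by
    simpa using hi
  rw [List.getD_eq_getElem _ _ hi', List.getElem_map, PySem.List.slice_to_natCast,
    List.getD_eq_getElem _ _ hi]

theorem gridOf_ent (m : List (List Int)) (hpre : Pre_find_landing_spot m)
    (i j : Nat) (hi : i < m.length) (hj : j < (m.headD []).length) :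
    ent (gridOf m) i j = ent m i j := by
  unfold ent
  rw [gridOf_row m i hi]
  have hmem : m.getD i [] ∈ m := by
    rw [List.getD_eq_getElem _ _ hi]; exact List.getElem_mem hi
  have hlen := hpre _ hmem
  have hj' : j < (List.take (m.headD []).length (m.getD i [])).length := by
    rw [List.length_take]; omega
  rw [List.getD_eq_getElem _ _ hj', List.getElem_take]
  exact (List.getD_eq_getElem _ _ (by omega)).symm

theorem getElem?_zip' {α β : Type} (l : List α) (l' : List β) (i : Nat) :
    (l.zip l')[i]? = match l[i]?, l'[i]? with | some a, some b => some (a, b) | _, _ => none := by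
  rw [List.zip_eq_zipWith]; exact List.getElem?_zipWith

theorem ent_eq (l : List (List Int)) (i j : Nat) :
    ent l i j = ((l[i]?.getD []))[j]?.getD 0 := by
  simp [ent, List.getD_eq_getElem?_getD]

theorem getElem?_gridOf (m : List (List Int)) (i : Nat) :
    (gridOf m)[i]? = m[i]?.map (fun row => row.take (m.headD []).length) := by
  simp [gridOf, List.getElem?_map, PySem.List.slice_to_natCast]

theorem gridOf_row? (m : List (List Int)) (i : Nat) (hi : i < m.length) :
    (gridOf m)[i]? = some ((m.getD i []).take (m.headD []).length) := by
  rw [getElem?_gridOf, List.getElem?_eq_getElem hi]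
  simp [List.getD_eq_getElem?_getD, List.getElem?_eq_getElem hi]

theorem inner_row (ua da ra : List Int) (C j : Nat) (hj : j < C)
    (h1 : ua.length = C) (h2 : da.length = C) (h3 : ra.length = C) :
    (((ua.zip (da.zip (((0:Int) :: PySem.List.slice ra none (some (-1))).zip
        (PySem.List.slice ra (some 1) none ++ [(0:Int)])))).map
        (fun q => q.1 + q.2.1 + q.2.2.1 + q.2.2.2))[j]?).getD 0
    = ua.getD j 0 + da.getD j 0 + (if 1 ≤ j then ra.getD (j-1) 0 else 0)
      + (if j + 1 < C then ra.getD (j+1) 0 else 0) := by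
  rw [PySem.List.slice_to_neg_one, PySem.List.slice_from_one]
  have hL : ((0:Int) :: ra.dropLast)[j]? = some (if 1 ≤ j then ra.getD (j-1) 0 else 0) := by
    cases j with
    | zero => simp
    | succ k =>
      rw [List.getElem?_cons_succ, List.getElem?_dropLast, if_pos (by omega),
        List.getElem?_eq_getElem (show k < ra.length by omega)]
      simp [List.getD_eq_getElem?_getD, List.getElem?_eq_getElem (show k < ra.length by omega)]
  have hR : (ra.tail ++ [(0:Int)])[j]? = some (if j + 1 < C then ra.getD (j+1) 0 else 0) := by
    by_cases h : j + 1 < C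
    · rw [List.getElem?_append_left (by rw [List.length_tail]; omega), List.getElem?_tail,
        List.getElem?_eq_getElem (show j + 1 < ra.length by omega)]
      simp [h, List.getD_eq_getElem?_getD, List.getElem?_eq_getElem (show j + 1 < ra.length by omega)]
    · rw [List.getElem?_append_right (by rw [List.length_tail]; omega)]
      have : j - ra.tail.length = 0 := by rw [List.length_tail]; omega
      rw [this]
      simp [h]
  rw [List.getElem?_map, getElem?_zip', getElem?_zip', getElem?_zip',
    List.getElem?_eq_getElem (show j < ua.length by omega),
    List.getElem?_eq_getElem (show j < da.length by omega), hL, hR]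
  simp [List.getD_eq_getElem?_getD, List.getElem?_eq_getElem (show j < ua.length by omega),
    List.getElem?_eq_getElem (show j < da.length by omega)]

theorem take_len (m : List (List Int)) (hpre : Pre_find_landing_spot m) (i : Nat)
    (hi : i < m.length) : ((m.getD i []).take (m.headD []).length).length = (m.headD []).length := by
  have hmem : m.getD i [] ∈ m := by
    rw [List.getD_eq_getElem _ _ hi]; exact List.getElem_mem hi
  have := hpre _ hmem
  rw [List.length_take]; omega

theorem take_ent (m : List (List Int)) (hpre : Pre_find_landing_spot m) (i j : Nat)
    (hi : i < m.length) (hj : j < (m.headD []).length) :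
    ((m.getD i []).take (m.headD []).length).getD j 0 = ent m i j := by
  have hmem : m.getD i [] ∈ m := by
    rw [List.getD_eq_getElem _ _ hi]; exact List.getElem_mem hi
  have hlen := hpre _ hmem
  have hj' : j < ((m.getD i []).take (m.headD []).length).length := by
    rw [List.length_take]; omega
  rw [List.getD_eq_getElem _ _ hj', List.getElem_take]
  unfold ent
  rw [List.getD_eq_getElem _ _ (show j < (m.getD i []).length by omega)]

theorem dangerOf_ent (m : List (List Int)) (hpre : Pre_find_landing_spot m)
    (i j : Nat) (hi : i < m.length) (hj : j < (m.headD []).length) :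
    ent (dangerOf m) i j = nbr m i j := by
  have hC1 : 1 ≤ (m.headD []).length := by omega
  rw [ent_eq]
  unfold dangerOf
  rw [PySem.List.slice_to_neg_one, PySem.List.slice_from_one]
  have hua : (List.replicate (m.headD []).length (0:Int) :: (gridOf m).dropLast)[i]? =
      some (if 1 ≤ i then (m.getD (i-1) []).take (m.headD []).length
            else List.replicate (m.headD []).length 0) := by
    cases i with
    | zero => simp
    | succ k =>
      rw [List.getElem?_cons_succ, List.getElem?_dropLast,
        if_pos (by rw [length_gridOf]; omega), gridOf_row? m k (by omega)]
      simp
  have hda : ((gridOf m).tail ++ [List.replicate (m.headD []).length (0:Int)])[i]? =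
      some (if i + 1 < m.length then (m.getD (i+1) []).take (m.headD []).length
            else List.replicate (m.headD []).length 0) := by
    by_cases h : i + 1 < m.length
    · rw [List.getElem?_append_left (by rw [List.length_tail, length_gridOf]; omega),
        List.getElem?_tail, gridOf_row? m (i+1) h]
      simp [h]
    · rw [List.getElem?_append_right (by rw [List.length_tail, length_gridOf]; omega)]
      have h0 : i - ((gridOf m).tail).length = 0 := by rw [List.length_tail, length_gridOf]; omega
      rw [h0]
      simp [h]
  rw [List.getElem?_map, getElem?_zip', getElem?_zip', hua, hda, gridOf_row? m i hi]
  show ((((if 1 ≤ i then (m.getD (i-1) []).take (m.headD []).length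
            else List.replicate (m.headD []).length 0).zip
          (((if i + 1 < m.length then (m.getD (i+1) []).take (m.headD []).length
            else List.replicate (m.headD []).length 0)).zip
            ((((0:Int) :: PySem.List.slice ((m.getD i []).take (m.headD []).length) none (some (-1))).zip
              (PySem.List.slice ((m.getD i []).take (m.headD []).length) (some 1) none ++ [(0:Int)]))))).map
          (fun q => q.1 + q.2.1 + q.2.2.1 + q.2.2.2))[j]?).getD 0 = nbr m i j
  rw [inner_row _ _ _ (m.headD []).length j hj
      (by split_ifs with h
          · exact take_len m hpre (i-1) (by omega)
          · simp)
      (by split_ifs with h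
          · exact take_len m hpre (i+1) h
          · simp)
      (take_len m hpre i hi)]
  unfold nbr
  congr 1
  · congr 1
    · congr 1
      · -- up term
        by_cases h : 1 ≤ i
        · rw [if_pos h, if_pos h, take_ent m hpre (i-1) j (by omega) hj]
        · rw [if_neg h, if_neg h]
          simp
      · -- down term
        by_cases h : i + 1 < m.length
        · rw [if_pos h, if_pos h, take_ent m hpre (i+1) j h hj]
        · rw [if_neg h, if_neg h]
          simp
    · -- left term
      by_cases h : 1 ≤ j
      · rw [if_pos h, if_pos h, take_ent m hpre i (j-1) hi (by omega)]
      · rw [if_neg h, if_neg h]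
  · -- right term
    by_cases h : j + 1 < (m.headD []).length
    · rw [if_pos h, if_pos h, take_ent m hpre i (j+1) hi h]
    · rw [if_neg h, if_neg h]

theorem py_ite_add (c : Prop) [Decidable c] (t v : Int) :
    (if c then t + v else t) = t + (if c then v else 0) := by
  split <;> simp

theorem totalA (m : List (List Int)) (i j : Nat)
    (hi : i < m.length) (hj : j < (m.headD []).length) :
    (([((-1:Int), (0:Int)), (1, 0), (0, -1), (0, 1)] : List (Int × Int)).foldl (fun t d =>
      if 0 ≤ (i:Int) + d.1 ∧ (i:Int) + d.1 < (m.length : Int) ∧ 0 ≤ (j:Int) + d.2 ∧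
          (j:Int) + d.2 < ((m.headD []).length : Int) then
        t + PySem.List.pyGetD (PySem.List.pyGetD m ((i:Int) + d.1) []) ((j:Int) + d.2) 0
      else t) 0) = nbr m i j := by
  simp only [List.foldl, py_ite_add]
  unfold nbr ent
  rw [zero_add]
  congr 1
  · congr 1
    · congr 1
      · by_cases h : 1 ≤ i
        · rw [if_pos ⟨by omega, by omega, by omega, by omega⟩, if_pos h,
            show ((i:Int) + -1) = (((i - 1 : Nat) : Nat) : Int) by omega,
            show ((j:Int) + 0) = ((j : Nat) : Int) by omega,
            PySem.List.pyGetD_natCast, PySem.List.pyGetD_natCast]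
        · rw [if_neg (by omega), if_neg h]
      · by_cases h : i + 1 < m.length
        · rw [if_pos ⟨by omega, by omega, by omega, by omega⟩, if_pos h,
            show ((i:Int) + 1) = (((i + 1 : Nat) : Nat) : Int) by omega,
            show ((j:Int) + 0) = ((j : Nat) : Int) by omega,
            PySem.List.pyGetD_natCast, PySem.List.pyGetD_natCast]
        · rw [if_neg (by omega), if_neg h]
    · by_cases h : 1 ≤ j
      · rw [if_pos ⟨by omega, by omega, by omega, by omega⟩, if_pos h,
          show ((j:Int) + -1) = (((j - 1 : Nat) : Nat) : Int) by omega,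
          show ((i:Int) + 0) = ((i : Nat) : Int) by omega,
          PySem.List.pyGetD_natCast, PySem.List.pyGetD_natCast]
      · rw [if_neg (by omega), if_neg h]
  · by_cases h : j + 1 < (m.headD []).length
    · rw [if_pos ⟨by omega, by omega, by omega, by omega⟩, if_pos h,
        show ((j:Int) + 1) = (((j + 1 : Nat) : Nat) : Int) by omega,
        show ((i:Int) + 0) = ((i : Nat) : Int) by omega,
        PySem.List.pyGetD_natCast, PySem.List.pyGetD_natCast]
    · rw [if_neg (by omega), if_neg h]

theorem step_eq (m : List (List Int)) (hpre : Pre_find_landing_spot m)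
    (st : Option Int × Option (List Int)) (r c : Int)
    (hr : 0 ≤ r ∧ r < (m.length : Int)) (hc : 0 ≤ c ∧ c < ((m.headD []).length : Int)) :
    (if PySem.List.pyGetD (PySem.List.pyGetD m r []) c 0 == 0 then
        if pyLtInf (([((-1:Int), (0:Int)), (1, 0), (0, -1), (0, 1)] : List (Int × Int)).foldl (fun t d =>
              if 0 ≤ r + d.1 ∧ r + d.1 < (m.length : Int) ∧ 0 ≤ c + d.2 ∧
                  c + d.2 < ((m.headD []).length : Int) then
                t + PySem.List.pyGetD (PySem.List.pyGetD m (r + d.1) []) (c + d.2) 0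
              else t) 0) st.1 then
          (some (([((-1:Int), (0:Int)), (1, 0), (0, -1), (0, 1)] : List (Int × Int)).foldl (fun t d =>
              if 0 ≤ r + d.1 ∧ r + d.1 < (m.length : Int) ∧ 0 ≤ c + d.2 ∧
                  c + d.2 < ((m.headD []).length : Int) then
                t + PySem.List.pyGetD (PySem.List.pyGetD m (r + d.1) []) (c + d.2) 0
              else t) 0), some [r, c])
        else st
      else st)
    =
    (if (PySem.List.pyGetD (PySem.List.pyGetD (gridOf m) r []) c 0 == 0) &&
        (match st.1 with
         | none => true
         | some mm => decide (PySem.List.pyGetD (PySem.List.pyGetD (dangerOf m) r []) c 0 < mm)) then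
       (some (PySem.List.pyGetD (PySem.List.pyGetD (dangerOf m) r []) c 0), some [r, c])
     else st) := by
  obtain ⟨i, rfl⟩ := Int.eq_ofNat_of_zero_le hr.1
  obtain ⟨j, rfl⟩ := Int.eq_ofNat_of_zero_le hc.1
  have hi : i < m.length := by exact_mod_cast hr.2
  have hj : j < (m.headD []).length := by exact_mod_cast hc.2
  have hg : PySem.List.pyGetD (PySem.List.pyGetD (gridOf m) (i : Int) []) (j : Int) 0
      = PySem.List.pyGetD (PySem.List.pyGetD m (i : Int) []) (j : Int) 0 := by
    rw [PySem.List.pyGetD_natCast, PySem.List.pyGetD_natCast, PySem.List.pyGetD_natCast,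
      PySem.List.pyGetD_natCast]
    exact gridOf_ent m hpre i j hi hj
  have hd : PySem.List.pyGetD (PySem.List.pyGetD (dangerOf m) (i : Int) []) (j : Int) 0
      = nbr m i j := by
    rw [PySem.List.pyGetD_natCast, PySem.List.pyGetD_natCast]
    exact dangerOf_ent m hpre i j hi hj
  rw [hg, hd, totalA m i j hi hj]
  simp only [PySem.List.pyGetD_natCast, List.getD_eq_getElem?_getD]
  by_cases h0 : ((m[i]?.getD ([] : List Int))[j]?.getD (0 : Int)) = 0
  · cases hst : st.1 <;> simp [h0, pyLtInf]
  · simp [h0]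

theorem find_landing_spot_eq (matrix : List (List Int))
    (hpre : Pre_find_landing_spot matrix) :
    find_landing_spot matrix = find_landing_spot_alt matrix := by
  by_cases hm : matrix = []
  · subst hm; rfl
  · have hm' : matrix.length ≠ 0 := by simpa [List.length_eq_zero_iff] using hm
    rw [alt_eq_gridOf, if_neg (by simpa using hm')]
    simp only [find_landing_spot]
    refine congrArg Prod.snd ?_
    refine PySem.List.foldl_congr_mem _ _ _ _ (fun acc r hr => ?_)
    refine PySem.List.foldl_congr_mem _ _ _ _ (fun acc' c hc => ?_)
    have hr' := PySem.List.mem_pyRange_one.mp hr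
    have hc' := PySem.List.mem_pyRange_one.mp hc
    exact step_eq matrix hpre acc' r c hr' hc'

-- ===== VERDICT (by name: the statement is the Claim_ definition above) =====
theorem find_landing_spot_spec : Claim_equal_find_landing_spot := by
  intro matrix _ hpre
  unfold Spec_find_landing_spot
  exact find_landing_spot_eq matrix hpre
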